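-- pv_equiv track=rewrite | github.com/serre-ai/research | scripts/compass/venue_enricher.py | get_latest_venue_year
-- ===== SOURCE A (Python) =====
-- def get_latest_venue_year(
--     venue_name: str,
--     venue_data: dict[str, dict],
-- ) -> tuple[dict | None, dict | None]:
--     """Find the latest and second-latest year data for a venue.
--
--     Args:
--         venue_name: Lowercase venue name (e.g. "neurips").
--         venue_data: Full dict from load_venue_data().
--
--     Returns:
--         (latest_data, previous_data) — either may be None if not found.
--     """
--     matching: list[tuple[int, dict]] = []
--     for key, data in venue_data.items():
--         parts = key.rsplit("-", 1)
--         if len(parts) == 2 and parts[0] == venue_name: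
--             try:
--                 year = int(parts[1])
--                 matching.append((year, data))
--             except ValueError:
--                 pass
--
--     if not matching:
--         return None, None
--
--     matching.sort(key=lambda x: x[0], reverse=True)
--     latest = matching[0][1]
--     previous = matching[1][1] if len(matching) > 1 else None
--     return latest, previous
-- ===== SOURCE B (Python) =====
-- def get_latest_venue_year(venue_name, venue_data):
--     best = None   # (year, data) with the largest year seen so far (first occurrence wins ties)
--     second = None  # runner-up
--     for key, data in venue_data.items():
--         parts = key.rsplit("-", 1)
--         if len(parts) == 2 and parts[0] == venue_name:
--             try:
--                 year = int(parts[1])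
--             except ValueError:
--                 continue
--             if best is None or year > best[0]:
--                 second = best
--                 best = (year, data)
--             elif second is None or year > second[0]:
--                 second = (year, data)
--     return (best[1] if best is not None else None,
--             second[1] if second is not None else None)
-- ===== Notes on version B (the rewrite author's own statement) =====
-- stated objective: alternative
-- what changed: Replaces collect-all-then-sort with a single pass that maintains the best and second-best (year, data) candidates, so no intermediate list is built and no sort is performed; runtime is dominated by key parsing, so measured speed is unchanged.
import Mathlib
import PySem

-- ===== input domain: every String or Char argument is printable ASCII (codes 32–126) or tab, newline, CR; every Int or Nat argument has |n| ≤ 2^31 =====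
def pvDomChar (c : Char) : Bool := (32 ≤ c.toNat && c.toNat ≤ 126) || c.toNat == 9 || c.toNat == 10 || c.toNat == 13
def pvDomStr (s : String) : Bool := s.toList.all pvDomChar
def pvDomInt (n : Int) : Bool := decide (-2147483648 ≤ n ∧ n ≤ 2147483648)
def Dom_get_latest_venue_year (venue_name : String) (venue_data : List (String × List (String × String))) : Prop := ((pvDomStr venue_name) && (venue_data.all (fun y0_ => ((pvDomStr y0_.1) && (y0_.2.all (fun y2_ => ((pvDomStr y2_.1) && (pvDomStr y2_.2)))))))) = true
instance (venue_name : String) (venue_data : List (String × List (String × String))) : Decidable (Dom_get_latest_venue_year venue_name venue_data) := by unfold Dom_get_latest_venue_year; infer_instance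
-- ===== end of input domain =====

-- B replaces collect-then-sort by a one-pass best/second-best scan (alternative algorithm; measured runtime is dominated by parsing and unchanged).


-- ===== PORT A =====
-- key.rsplit("-", 1): hand-written (PySem has no rsplit); exact: splits at the LAST '-'
-- (index = len - 1 - idxOf in the reverse), one part if '-' is absent.
def pvRsplitDash1 (cs : List Char) : List (List Char) :=
  if '-' ∈ cs then
    let i := cs.length - 1 - cs.reverse.idxOf '-'
    [cs.take i, cs.drop (i + 1)]
  else [cs]

-- the shared body of A's and B's loop: parts = key.rsplit("-",1); len(parts)==2 and
-- parts[0]==venue_name; int(parts[1]) with ValueError swallowed (= none here).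
def pvParseYear (venue_name key : String) : Option Int :=
  match pvRsplitDash1 key.toList with
  | [p0, p1] => if p0 = venue_name.toList then PySem.Int.ofChars? p1 else none
  | _ => none

def get_latest_venue_year (venue_name : String) (venue_data : List (String × List (String × String))) : (Option (List (String × String))) × (Option (List (String × String))) :=
  let matching : List (Int × List (String × String)) :=
    venue_data.foldl (fun acc kd =>
      match pvParseYear venue_name kd.1 with
      | some year => acc ++ [(year, kd.2)]
      | none => acc) []
  if matching = [] then (none, none)
  else
    let ms := PySem.List.sorted matching (fun x => x.1) true
    ((PySem.List.pyGet? ms 0).map (·.2),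
     if 1 < ms.length then (PySem.List.pyGet? ms 1).map (·.2) else none)

-- ===== PORT B =====
-- one step of B's loop: promote (year, data) into the (best, second) pair
def pvBestStep (st : Option (Int × List (String × String)) × Option (Int × List (String × String))) (p : Int × List (String × String)) : Option (Int × List (String × String)) × Option (Int × List (String × String)) :=
  match st.1 with
  | none => (some p, st.1)
  | some b =>
    if b.1 < p.1 then (some p, st.1)
    else
      match st.2 with
      | none => (st.1, some p)
      | some s => if s.1 < p.1 then (st.1, some p) else st

def get_latest_venue_year_alt (venue_name : String) (venue_data : List (String × List (String × String))) : (Option (List (String × String))) × (Option (List (String × String))) :=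
  let st :=
    venue_data.foldl (fun st kd =>
      match pvParseYear venue_name kd.1 with
      | some year => pvBestStep st (year, kd.2)
      | none => st) (none, none)
  (st.1.map (·.2), st.2.map (·.2))

-- ===== PRECONDITION & SPEC =====
def Spec_get_latest_venue_year (venue_name : String) (venue_data : List (String × List (String × String))) (out : (Option (List (String × String))) × (Option (List (String × String)))) : Prop := out = get_latest_venue_year_alt venue_name venue_data
instance (venue_name : String) (venue_data : List (String × List (String × String))) (out : (Option (List (String × String))) × (Option (List (String × String)))) : Decidable (Spec_get_latest_venue_year venue_name venue_data out) := by unfold Spec_get_latest_venue_year; infer_instance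

-- ===== CLAIM (what is proved, stated in full; the proofs are below) =====
def Claim_equal_get_latest_venue_year : Prop := ∀ (venue_name : String) (venue_data : List (String × List (String × String))), Dom_get_latest_venue_year venue_name venue_data → Spec_get_latest_venue_year venue_name venue_data (get_latest_venue_year venue_name venue_data)

-- ===== LEMMAS AND PROOFS =====

-- first two elements of a list, as B's (best, second) state
def pvTop2 {D : Type} (s : List (Int × D)) : Option (Int × D) × Option (Int × D) :=
  match s with
  | [] => (none, none)
  | [a] => (some a, none)
  | a :: b :: _ => (some a, some b)

-- the (year, data) pairs both loops process, in order
def pvCollect (venue_name : String) (venue_data : List (String × List (String × String))) : List (Int × List (String × String)) :=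
  venue_data.filterMap (fun kd => (pvParseYear venue_name kd.1).map (fun y => (y, kd.2)))

lemma pvCollect_foldl (venue_name : String) (venue_data : List (String × List (String × String))) (acc : List (Int × List (String × String))) :
    venue_data.foldl (fun acc kd =>
      match pvParseYear venue_name kd.1 with
      | some year => acc ++ [(year, kd.2)]
      | none => acc) acc = acc ++ pvCollect venue_name venue_data := by
  induction venue_data generalizing acc with
  | nil => simp [pvCollect]
  | cons kd t ih =>
    simp only [List.foldl_cons, pvCollect, List.filterMap_cons]
    cases h : pvParseYear venue_name kd.1 with
    | none => simpa [h, pvCollect] using ih acc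
    | some y => simpa [h, pvCollect] using ih (acc ++ [(y, kd.2)])

lemma pvAlt_foldl (venue_name : String) (venue_data : List (String × List (String × String))) (st : Option (Int × List (String × String)) × Option (Int × List (String × String))) :
    venue_data.foldl (fun st kd =>
      match pvParseYear venue_name kd.1 with
      | some year => pvBestStep st (year, kd.2)
      | none => st) st = (pvCollect venue_name venue_data).foldl pvBestStep st := by
  induction venue_data generalizing st with
  | nil => simp [pvCollect]
  | cons kd t ih =>
    simp only [List.foldl_cons, pvCollect, List.filterMap_cons]
    cases h : pvParseYear venue_name kd.1 with
    | none => simpa [h, pvCollect] using ih st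
    | some y => simpa [h, pvCollect] using ih (pvBestStep st (y, kd.2))

-- one B step on the top-2 view = inserting into the (descending, stable) sorted list
lemma pvStep_top2 (s : List (Int × List (String × String))) (x : Int × List (String × String)) :
    pvBestStep (pvTop2 s) x = pvTop2 (PySem.List.insertBy (fun a b => decide (b.1 < a.1)) x s) := by
  match s with
  | [] => rfl
  | [a] =>
    simp only [pvTop2, pvBestStep, PySem.List.insertBy]
    by_cases h : a.1 < x.1 <;> simp [h, PySem.List.insertBy, pvTop2]
  | a :: b :: t =>
    simp only [pvTop2, pvBestStep, PySem.List.insertBy]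
    by_cases h1 : a.1 < x.1
    · simp [h1, pvTop2]
    · by_cases h2 : b.1 < x.1 <;> simp [h1, h2, PySem.List.insertBy, pvTop2]

lemma pvFold_top2 (m : List (Int × List (String × String))) (s : List (Int × List (String × String))) :
    m.foldl pvBestStep (pvTop2 s) = pvTop2 (m.foldl (fun acc x => PySem.List.insertBy (fun a b => decide (b.1 < a.1)) x acc) s) := by
  induction m generalizing s with
  | nil => rfl
  | cons x t ih =>
    simp only [List.foldl_cons, pvStep_top2]
    exact ih _

lemma pvA_view (s : List (Int × List (String × String))) (hs : s ≠ []) :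
    (((PySem.List.pyGet? s 0).map (·.2) : Option (List (String × String))),
     (if 1 < s.length then (PySem.List.pyGet? s 1).map (·.2) else none : Option (List (String × String)))) =
    ((pvTop2 s).1.map (·.2), (pvTop2 s).2.map (·.2)) := by
  match s with
  | [] => exact absurd rfl hs
  | [a] => simp [pvTop2, PySem.List.pyGet?, PySem.List.pyIdx?]
  | a :: b :: t =>
    have h : (0:Int) ≤ (t.length:Int) + 1 := by positivity
    simp [pvTop2, PySem.List.pyGet?, PySem.List.pyIdx?, h]

-- ===== VERDICT (by name: the statement is the Claim_ definition above) =====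
theorem get_latest_venue_year_spec : Claim_equal_get_latest_venue_year := by
  intro vn vd _
  unfold Spec_get_latest_venue_year get_latest_venue_year get_latest_venue_year_alt
  simp only [pvCollect_foldl, pvAlt_foldl, List.nil_append]
  have hfold : (pvCollect vn vd).foldl pvBestStep (none, none) =
      pvTop2 (PySem.List.sorted (pvCollect vn vd) (fun x => x.1) true) := by
    rw [PySem.List.sorted_rev_eq_foldl_insertBy]
    exact pvFold_top2 (pvCollect vn vd) []
  by_cases h : pvCollect vn vd = []
  · simp [h]
  · have hs : PySem.List.sorted (pvCollect vn vd) (fun x => x.1) true ≠ [] := by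
      rw [Ne, PySem.List.sorted_eq_nil_iff]; exact h
    simp only [if_neg h, hfold]
    exact pvA_view _ hs
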